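-- pv_equiv track=rewrite | github.com/BrechtVandevoort/AdventOfCode | 2020/day_06/day_06.py | all_yes
-- ===== SOURCE A (Python) =====
-- def all_yes(group):
--     count = 0
--     for c in group[0].strip():
--         for line in group:
--             if c not in line:
--                 break
--         else:
--             count += 1
--     return count
-- ===== SOURCE B (Python) =====
-- def all_yes(group):
--     common = set(group[0])
--     for line in group[1:]:
--         common &= set(line)
--     counts = {}
--     for c in group[0].strip():
--         counts[c] = counts.get(c, 0) + 1
--     return sum(counts.get(c, 0) for c in common)
-- ===== Notes on version B (the rewrite author's own statement) =====
-- stated objective: alternative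
-- what changed: Replaces the per-character nested membership scan over all lines by one intersection pass building the set of characters common to all lines, plus a frequency table of the stripped first line summed over that set.
-- outside the precondition, e.g. on all_yes([]): A raises IndexError, B raises IndexError
import Mathlib
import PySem

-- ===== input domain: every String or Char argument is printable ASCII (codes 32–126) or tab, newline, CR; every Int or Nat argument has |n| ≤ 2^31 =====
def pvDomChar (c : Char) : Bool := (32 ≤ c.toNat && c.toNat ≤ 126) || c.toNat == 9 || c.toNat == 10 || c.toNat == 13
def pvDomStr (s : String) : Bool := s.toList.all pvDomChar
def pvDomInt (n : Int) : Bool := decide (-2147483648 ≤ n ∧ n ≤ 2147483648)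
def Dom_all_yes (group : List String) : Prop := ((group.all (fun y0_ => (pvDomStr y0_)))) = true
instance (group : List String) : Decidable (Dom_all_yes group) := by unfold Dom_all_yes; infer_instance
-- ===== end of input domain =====

-- B replaces A's per-character scan of all lines by one set-intersection pass plus a
-- frequency table of the stripped first line summed over the common set ("alternative").

-- ===== PORT A =====
-- inner 'for line in group: if c not in line: break / else: count += 1' — true iff no break
def allYesInner (c : Char) : List String → Bool
  | [] => true
  | line :: rest => if (line.toList.contains c) = false then false else allYesInner c rest

def all_yes (group : List String) : Int :=
  match PySem.List.pyGet? group 0 with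
  | none => 0   -- group[0] raises IndexError; excluded by Pre_all_yes
  | some first =>
    (PySem.Str.strip first).toList.foldl
      (fun count c => if allYesInner c group then count + 1 else count) 0

-- ===== PORT B =====
def all_yes_alt (group : List String) : Int :=
  match PySem.List.pyGet? group 0 with
  | none => 0   -- group[0] raises IndexError; excluded by Pre_all_yes
  | some first =>
    let common : PySem.Set Char :=
      (PySem.List.slice group (some 1) none).foldl
        (fun s line => PySem.Set.inter s (PySem.Set.ofList line.toList))
        (PySem.Set.ofList first.toList)
    let counts : PySem.Dict Char Int :=
      (PySem.Str.strip first).toList.foldl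
        (fun d c => d.insert c (d.getD c 0 + 1)) PySem.Dict.empty
    common.foldl (fun acc c => acc + counts.getD c 0) 0

-- ===== PRECONDITION & SPEC =====
-- Pre_ excludes only the empty group, on which A raises IndexError (group[0]).
def Pre_all_yes (group : List String) : Prop := group ≠ []
instance (group : List String) : Decidable (Pre_all_yes group) := by unfold Pre_all_yes; infer_instance
def pvWitness_all_yes : List String := ["a b", "ab"]

def Spec_all_yes (group : List String) (out : Int) : Prop := out = all_yes_alt group
instance (group : List String) (out : Int) : Decidable (Spec_all_yes group out) := by unfold Spec_all_yes; infer_instance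

-- ===== CLAIM (what is proved, stated in full; the proofs are below) =====
def Claim_equal_all_yes : Prop := ∀ (group : List String), Dom_all_yes group → Pre_all_yes group → Spec_all_yes group (all_yes group)

-- ===== LEMMAS AND PROOFS =====

theorem allYesInner_eq_all (c : Char) (l : List String) :
    allYesInner c l = l.all (fun line => line.toList.contains c) := by
  induction l with
  | nil => rfl
  | cons line rest ih => simp [allYesInner, List.all_cons, ih]

-- B's intersection loop, named for the proofs
def interFold (first : String) (rest : List String) : PySem.Set Char :=
  rest.foldl (fun s line => PySem.Set.inter s (PySem.Set.ofList line.toList))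
    (PySem.Set.ofList first.toList)

theorem inter_fold_mem (rest : List String) (s0 : PySem.Set Char) (c : Char) :
    c ∈ rest.foldl (fun s line => PySem.Set.inter s (PySem.Set.ofList line.toList)) s0 ↔
      c ∈ s0 ∧ ∀ line ∈ rest, c ∈ line.toList := by
  induction rest generalizing s0 with
  | nil => simp
  | cons line rest ih =>
      simp only [List.foldl_cons, ih, PySem.Set.mem_inter, PySem.Set.mem_ofList,
        List.mem_cons]
      constructor
      · rintro ⟨⟨h1, h2⟩, h3⟩
        refine ⟨h1, ?_⟩
        intro l hl
        rcases hl with rfl | hl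
        · exact h2
        · exact h3 l hl
      · rintro ⟨h1, h2⟩
        exact ⟨⟨h1, h2 line (Or.inl rfl)⟩, fun l hl => h2 l (Or.inr hl)⟩

theorem interFold_mem (first : String) (rest : List String) (c : Char) :
    c ∈ interFold first rest ↔ c ∈ first.toList ∧ ∀ line ∈ rest, c ∈ line.toList := by
  unfold interFold
  rw [inter_fold_mem]
  simp [PySem.Set.mem_ofList]

theorem interFold_nodup (first : String) (rest : List String) :
    (interFold first rest).Nodup := by
  unfold interFold
  generalize h0 : PySem.Set.ofList first.toList = s0
  have hs0 : s0.Nodup := h0 ▸ PySem.Set.nodup_ofList first.toList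
  clear h0
  induction rest generalizing s0 with
  | nil => exact hs0
  | cons line rest ih => exact ih _ (PySem.Set.nodup_inter _ _ hs0)

theorem countP_cons_mem (s : List Char) (c : Char) (rest : List Char) (h : c ∉ rest) :
    s.countP (fun x => decide (x ∈ c :: rest)) =
      s.count c + s.countP (fun x => decide (x ∈ rest)) := by
  induction s with
  | nil => simp
  | cons x s ih =>
      by_cases hx : x = c
      · subst hx
        simp only [List.countP_cons, List.count_cons, ih]
        simp [h]
        try omega
      · by_cases hr : x ∈ rest <;>
          · simp only [List.countP_cons, List.count_cons, ih]
            simp [hx, hr]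
            try omega

-- summing per-character counts over a duplicate-free list counts the members
theorem sum_count_eq_countP (l : List Char) (s : List Char) (hl : l.Nodup) (a : Int) :
    l.foldl (fun acc c => acc + (s.count c : Int)) a =
      a + (s.countP (fun x => decide (x ∈ l)) : Int) := by
  induction l generalizing a with
  | nil => simp
  | cons c rest ih =>
      have hc : c ∉ rest := (List.nodup_cons.mp hl).1
      rw [List.foldl_cons, ih (List.nodup_cons.mp hl).2, countP_cons_mem s c rest hc]
      push_cast
      ring

theorem all_yes_eq_alt (first : String) (rest : List String) :
    all_yes (first :: rest) = all_yes_alt (first :: rest) := by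
  have hA : all_yes (first :: rest) =
      ((PySem.Str.strip first).toList.countP
        (fun c => allYesInner c (first :: rest)) : Int) := by
    unfold all_yes
    rw [PySem.List.pyGet?_zero_cons]
    simp only [PySem.List.foldl_if_add_one, zero_add]
  have hB1 : all_yes_alt (first :: rest) =
      (interFold first rest).foldl
        (fun acc c => acc + ((PySem.Str.strip first).toList.foldl
          (fun d c => d.insert c (d.getD c 0 + 1)) PySem.Dict.empty).getD c 0) 0 := by
    unfold all_yes_alt interFold
    rw [PySem.List.pyGet?_zero_cons]
    simp only [PySem.List.slice_from_one, List.tail_cons]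
  have hB2 : (interFold first rest).foldl
        (fun acc c => acc + ((PySem.Str.strip first).toList.foldl
          (fun d c => d.insert c (d.getD c 0 + 1)) PySem.Dict.empty).getD c 0) 0 =
      (interFold first rest).foldl
        (fun acc c => acc + ((PySem.Str.strip first).toList.count c : Int)) 0 := by
    apply PySem.List.foldl_congr_mem
    intro acc c _
    rw [PySem.Dict.getD_foldl_insert_add_one]
    simp
  have hP : (PySem.Str.strip first).toList.countP (fun c => allYesInner c (first :: rest))
      = (PySem.Str.strip first).toList.countP
          (fun x => decide (x ∈ interFold first rest)) := by
    apply List.countP_congr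
    intro c _
    simp only [allYesInner_eq_all, List.all_cons, List.all_eq_true, Bool.and_eq_true,
      List.contains_eq_mem, decide_eq_true_eq, interFold_mem]
  rw [hA, hB1, hB2,
    sum_count_eq_countP _ _ (interFold_nodup first rest) 0, zero_add, hP]

-- ===== VERDICT (by name: the statement is the Claim_ definition above) =====
theorem all_yes_spec : Claim_equal_all_yes := by
  intro group _ hpre
  cases group with
  | nil => exact absurd rfl hpre
  | cons first rest => exact all_yes_eq_alt first rest
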